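-- pv_equiv track=rewrite | github.com/OlivkaFromHell/homework_epam | hw1/task02.py | check_fibonacci
-- ===== SOURCE A (Python) =====
-- from typing import Sequence
--
-- def last_fib(num: int) -> int:
--     """Return last Fibonacci number sequnce before number num"""
--     if num == 0:
--         return 0
--     fib = [0, 1]
--     i = 2
--     # appends fib numbers until fib[-1] == num or > num
--     # if fib[-1] > num it means that first number of original sequnce
--     # data isn't belong to fib nums
--     while fib[-1] < num:
--         fib.append(fib[i - 1] + fib[i - 2])
--         i += 1
--
--     return fib[-1]
--
-- def check_fibonacci(data: Sequence[int]) -> bool: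
--
--     if len(data) < 3:
--         return False
--
--     if data[0] != last_fib(data[0]):
--         return False
--
--     # if seq is [0, -fib1, -fib2...] it shouldn't return True
--     if data[1] < 0:
--         return False
--
--     i = 0
--     while i <= len(data) - 3:
--         if not (data[i] + data[i+1] == data[i+2]):
--             return False
--         i += 1
--     return True
-- ===== SOURCE B (Python) =====
-- from math import isqrt
-- from typing import Sequence
--
--
-- def _is_fib(n: int) -> bool:
--     """n >= 0 is a Fibonacci number iff 5*n^2+4 or 5*n^2-4 is a perfect square."""
--     if n < 0:
--         return False
--     x = 5 * n * n
--     s = isqrt(x + 4)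
--     if s * s == x + 4:
--         return True
--     return x >= 4 and isqrt(x - 4) ** 2 == x - 4
--
--
-- def check_fibonacci(data: Sequence[int]) -> bool:
--     if len(data) < 3 or data[0] < 0 or data[1] < 0:
--         return False
--     if not _is_fib(data[0]):
--         return False
--     return all(a + b == c for a, b, c in zip(data, data[1:], data[2:]))
-- ===== Notes on version B (the rewrite author's own statement) =====
-- stated objective: idiomatic
-- what changed: The iterative build-the-Fibonacci-list membership test is replaced by the closed-form perfect-square test (5n^2+4 or 5n^2-4 is a square, via math.isqrt) with an explicit n<0 guard, and the index-based while loop over triples is replaced by a zip/all comprehension.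
import Mathlib
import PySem

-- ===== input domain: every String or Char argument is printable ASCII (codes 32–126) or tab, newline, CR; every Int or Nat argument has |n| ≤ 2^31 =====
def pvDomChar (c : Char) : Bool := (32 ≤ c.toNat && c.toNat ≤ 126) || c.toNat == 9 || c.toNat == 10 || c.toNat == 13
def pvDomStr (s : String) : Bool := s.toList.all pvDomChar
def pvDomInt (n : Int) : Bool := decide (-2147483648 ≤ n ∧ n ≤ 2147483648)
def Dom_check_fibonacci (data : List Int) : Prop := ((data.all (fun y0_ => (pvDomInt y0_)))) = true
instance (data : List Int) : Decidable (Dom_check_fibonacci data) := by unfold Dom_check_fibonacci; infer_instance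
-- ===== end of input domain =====

-- B replaces A's iterative Fibonacci-list membership test by the closed-form
-- 5n^2±4 perfect-square test and the index while-loop by a zip/all scan (idiomatic).


-- ===== PORT A =====
-- Python's `while fib[-1] < num: fib.append(fib[i-1] + fib[i-2])` reads only the
-- last two list entries, carried here as (a, b); the fuel `num.toNat + 2` is a
-- totality guard only — proved sufficient below (fibGrow), never reached early.
def lastFibAux : Nat → Int → Int → Int → Int
  | 0, _, _, b => b
  | fuel+1, num, a, b => if b < num then lastFibAux fuel num b (a + b) else b

def last_fib (num : Int) : Int :=
  if num = 0 then 0 else lastFibAux (num.toNat + 2) num 0 1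

-- the `while i <= len(data) - 3` loop (i starts at 0 and only grows, so i : Nat)
def checkLoop (data : List Int) (i : Nat) : Bool :=
  if _h : i + 3 ≤ data.length then
    if data.getD i 0 + data.getD (i+1) 0 = data.getD (i+2) 0 then checkLoop data (i+1)
    else false
  else true
termination_by data.length - i

def check_fibonacci (data : List Int) : Bool :=
  if data.length < 3 then false
  else if data.getD 0 0 ≠ last_fib (data.getD 0 0) then false
  else if data.getD 1 0 < 0 then false
  else checkLoop data 0

-- ===== PORT B =====
-- math.isqrt on the nonnegative ints reached here is exactly Nat.sqrt (exact port)
def is_fib (n : Int) : Bool :=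
  if n < 0 then false
  else
    let x := (5 * n * n).toNat   -- n ≥ 0 here, so toNat is exact
    if Nat.sqrt (x + 4) * Nat.sqrt (x + 4) = x + 4 then true
    else decide (4 ≤ x) && decide (Nat.sqrt (x - 4) * Nat.sqrt (x - 4) = x - 4)

-- all(a + b == c for a, b, c in zip(data, data[1:], data[2:]))
def tripleAll (data : List Int) : Bool :=
  (data.zip ((data.drop 1).zip (data.drop 2))).all fun p => p.1 + p.2.1 == p.2.2

def check_fibonacci_alt (data : List Int) : Bool :=
  if data.length < 3 || decide (data.getD 0 0 < 0) || decide (data.getD 1 0 < 0) then false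
  else if !is_fib (data.getD 0 0) then false
  else tripleAll data

-- ===== PRECONDITION & SPEC =====
def Spec_check_fibonacci (data : List Int) (out : Bool) : Prop := out = check_fibonacci_alt data
instance (data : List Int) (out : Bool) : Decidable (Spec_check_fibonacci data out) := by unfold Spec_check_fibonacci; infer_instance

-- ===== CLAIM (what is proved, stated in full; the proofs are below) =====
def Claim_equal_check_fibonacci : Prop := ∀ (data : List Int), Dom_check_fibonacci data → Spec_check_fibonacci data (check_fibonacci data)

-- ===== LEMMAS AND PROOFS =====

-- Lucas numbers, used only in the proofs
def lucas : Nat → Nat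
  | 0 => 2
  | 1 => 1
  | n+2 => lucas n + lucas (n+1)

lemma lucas_int : ∀ k, (lucas k : ℤ) = 2 * Nat.fib (k+1) - Nat.fib k := by
  intro k
  induction k using Nat.strong_induction_on with
  | _ k ih =>
    match k with
    | 0 => simp [lucas]
    | 1 => norm_num [lucas, Nat.fib_one, Nat.fib_two]
    | (n+2) =>
      have h1 := ih n (by omega)
      have h2 := ih (n+1) (by omega)
      have f2 : (Nat.fib (n+2) : ℤ) = Nat.fib n + Nat.fib (n+1) := by
        rw [Nat.fib_add_two]; push_cast; ring
      have f3 : (Nat.fib (n+3) : ℤ) = Nat.fib (n+1) + Nat.fib (n+2) := by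
        rw [show n+3 = (n+1)+2 by ring, Nat.fib_add_two]; push_cast; ring
      have hl : (lucas (n+2) : ℤ) = lucas n + lucas (n+1) := by
        rw [show lucas (n+2) = lucas n + lucas (n+1) from rfl]; push_cast; ring
      rw [hl, h1, h2, show n+2+1 = n+3 from rfl, f3, f2]; ring

-- Cassini-style identity
lemma fib_cassini : ∀ k, (Nat.fib (k+1) : ℤ)^2 - Nat.fib (k+1) * Nat.fib k - (Nat.fib k)^2 = (-1)^k := by
  intro k
  induction k with
  | zero => simp
  | succ n ih =>
    have f2 : (Nat.fib (n+2) : ℤ) = Nat.fib n + Nat.fib (n+1) := by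
      rw [Nat.fib_add_two]; push_cast; ring
    rw [f2]
    linear_combination (-1 : ℤ) * ih

-- Pell relation L_k^2 - 5 F_k^2 = 4(-1)^k
lemma lucas_pell : ∀ k, (lucas k : ℤ)^2 - 5 * (Nat.fib k)^2 = 4 * (-1)^k := by
  intro k
  have h := fib_cassini k
  rw [lucas_int k]
  linear_combination (4 : ℤ) * h

-- descent: every solution of x^2 - 5y^2 = ±4 is a (Lucas, Fibonacci) pair
lemma pell_fib : ∀ y x : ℕ, (x*x = 5*(y*y) + 4 ∨ x*x + 4 = 5*(y*y)) → ∃ k, y = Nat.fib k ∧ x = lucas k := by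
  intro y
  induction y using Nat.strong_induction_on with
  | _ y ih =>
    intro x hx
    rcases y with _ | y1
    · have : x = 2 := by rcases hx with h | h <;> nlinarith
      exact ⟨0, by simp [this, lucas]⟩
    rcases y1 with _ | m
    · rcases hx with h | h
      · have : x = 3 := by nlinarith
        exact ⟨2, by simp [this, lucas, Nat.fib_two]⟩
      · have : x = 1 := by nlinarith
        exact ⟨1, by simp [this, lucas]⟩
    -- y = m + 2 ≥ 2
    set y := m + 2 with hydef
    have hyy : 4 ≤ y * y := by nlinarith [show 2 ≤ y by omega]
    have hxy : y ≤ x := by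
      by_contra hlt
      have := Nat.mul_self_lt_mul_self (show x < y by omega)
      rcases hx with h | h <;> omega
    have hx3 : x < 3 * y := by
      by_contra hge
      have h9 := Nat.mul_self_le_mul_self (show 3*y ≤ x by omega)
      have e9 : (3*y) * (3*y) = 9 * (y*y) := by ring
      rcases hx with h | h <;> omega
    have hx5 : x ≤ 5 * y := by omega
    have e1 : x * x % 2 = x % 2 := by
      rw [Nat.mul_mod]; rcases Nat.mod_two_eq_zero_or_one x with h | h <;> simp [h]
    have e2 : y * y % 2 = y % 2 := by
      rw [Nat.mul_mod]; rcases Nat.mod_two_eq_zero_or_one y with h | h <;> simp [h]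
    have hpar : x % 2 = y % 2 := by rcases hx with h | h <;> omega
    set y' := (x - y) / 2 with hy'def
    set x' := (5*y - x) / 2 with hx'def
    have hy'2 : x - y = 2 * y' := by omega
    have hx'2 : 5*y - x = 2 * x' := by omega
    have hy'Z : (x : ℤ) - y = 2 * y' := by
      have := hy'2; zify [hxy] at this; linarith
    have hx'Z : 5*(y : ℤ) - x = 2 * x' := by
      have := hx'2; zify [hx5] at this; linarith
    have hlt : y' < y := by omega
    have hkey : (x'*x' = 5*(y'*y') + 4 ∨ x'*x' + 4 = 5*(y'*y')) := by
      rcases hx with h | h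
      · right
        have hZ : (x:ℤ) * x = 5*((y:ℤ)*y) + 4 := by exact_mod_cast h
        have h4G : 4*((x':ℤ)*x') + 16 = 4*(5*((y':ℤ)*y')) := by
          linear_combination (-(5*(y:ℤ) - x + 2*x')) * hx'Z + (5*((x:ℤ) - y + 2*y')) * hy'Z - 4*hZ
        have hNN : 4*(x'*x') + 16 = 4*(5*(y'*y')) := by exact_mod_cast h4G
        omega
      · left
        have hZ : (x:ℤ) * x + 4 = 5*((y:ℤ)*y) := by exact_mod_cast h
        have h4G : 4*((x':ℤ)*x') = 4*(5*((y':ℤ)*y')) + 16 := by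
          linear_combination (-(5*(y:ℤ) - x + 2*x')) * hx'Z + (5*((x:ℤ) - y + 2*y')) * hy'Z - 4*hZ
        have hNN : 4*(x'*x') = 4*(5*(y'*y')) + 16 := by exact_mod_cast h4G
        omega
    obtain ⟨k, hk1, hk2⟩ := ih y' hlt x' hkey
    have I1 : Nat.fib k + lucas k = 2 * Nat.fib (k+1) := by
      have := lucas_int k; omega
    have I2 : 5 * Nat.fib k + lucas k = 2 * lucas (k+1) := by
      have h1 := lucas_int (k+1)
      rw [show k+1+1 = k+2 by omega] at h1
      have h2 := lucas_int k
      have hf : Nat.fib (k+2) = Nat.fib k + Nat.fib (k+1) := Nat.fib_add_two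
      omega
    have hsum : x' + y' = 2 * y := by omega
    have hsum2 : 5 * y' + x' = 2 * x := by omega
    exact ⟨k+1, by omega, by omega⟩

-- square test characterises Fibonacci membership
lemma isfib_iff (n : Int) : is_fib n = true ↔ (0 ≤ n ∧ ∃ k, n = (Nat.fib k : ℤ)) := by
  by_cases hneg : n < 0
  · rw [is_fib, if_pos hneg]
    simp only [Bool.false_eq_true, false_iff, not_and]
    intro h
    exact absurd hneg (by omega)
  rw [not_lt] at hneg
  set m := n.toNat with hm
  have hn : n = (m : ℤ) := (Int.toNat_of_nonneg hneg).symm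
  have hxval : (5 * n * n).toNat = 5 * (m * m) := by
    rw [hn, show 5 * (m:ℤ) * m = ((5 * (m*m) : ℕ) : ℤ) by push_cast; ring, Int.toNat_natCast]
  have core : is_fib n = true ↔
      ((∃ s, s * s = 5*(m*m) + 4) ∨ (4 ≤ 5*(m*m) ∧ ∃ s, s * s + 4 = 5*(m*m))) := by
    rw [is_fib, if_neg (by omega)]
    simp only [hxval]
    constructor
    · intro h
      by_cases h1 : Nat.sqrt (5*(m*m) + 4) * Nat.sqrt (5*(m*m) + 4) = 5*(m*m) + 4
      · exact Or.inl ⟨_, h1⟩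
      · rw [if_neg h1] at h
        simp only [Bool.and_eq_true, decide_eq_true_eq] at h
        exact Or.inr ⟨h.1, ⟨Nat.sqrt (5*(m*m) - 4), by omega⟩⟩
    · intro h
      rcases h with ⟨s, hs⟩ | ⟨h4, s, hs⟩
      · rw [if_pos (by rw [← hs, Nat.sqrt_eq s])]
      · by_cases h1 : Nat.sqrt (5*(m*m) + 4) * Nat.sqrt (5*(m*m) + 4) = 5*(m*m) + 4
        · rw [if_pos h1]
        · rw [if_neg h1]
          have : 5*(m*m) - 4 = s * s := by omega
          simp [h4, this, Nat.sqrt_eq s]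
  rw [core]
  constructor
  · rintro (⟨s, hs⟩ | ⟨h4, s, hs⟩)
    · obtain ⟨k, hk1, _⟩ := pell_fib m s (Or.inl hs)
      exact ⟨hneg, k, by rw [hn, hk1]⟩
    · obtain ⟨k, hk1, _⟩ := pell_fib m s (Or.inr hs)
      exact ⟨hneg, k, by rw [hn, hk1]⟩
  · rintro ⟨-, k, hk⟩
    have hmk : m = Nat.fib k := by omega
    have hp := lucas_pell k
    rcases Nat.even_or_odd k with he | ho
    · left
      refine ⟨lucas k, ?_⟩
      have : ((-1 : ℤ))^k = 1 := he.neg_one_pow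
      rw [this] at hp
      have : (lucas k : ℤ) * lucas k = 5*((Nat.fib k : ℤ)*(Nat.fib k)) + 4 := by nlinarith [hp]
      rw [hmk]; exact_mod_cast this
    · right
      have : ((-1 : ℤ))^k = -1 := ho.neg_one_pow
      rw [this] at hp
      have hZ : (lucas k : ℤ) * lucas k + 4 = 5*((Nat.fib k : ℤ)*(Nat.fib k)) := by nlinarith [hp]
      have hN : lucas k * lucas k + 4 = 5*(Nat.fib k * Nat.fib k) := by exact_mod_cast hZ
      refine ⟨?_, lucas k, ?_⟩ <;> rw [hmk] <;> omega

-- fuel sufficiency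
lemma fibGrow : ∀ m : ℕ, m ≤ Nat.fib (m + 3) := by
  intro m
  induction m with
  | zero => simp
  | succ n ih =>
    have h1 : 0 < Nat.fib (n + 2) := Nat.fib_pos.mpr (by omega)
    have h2 : Nat.fib (n + 4) = Nat.fib (n + 2) + Nat.fib (n + 3) := by
      rw [show n+4 = (n+2)+2 by ring, Nat.fib_add_two]
    rw [show n + 1 + 3 = n + 4 by omega]
    omega

-- the loop of last_fib returns the first Fibonacci value ≥ num
lemma lastFibAux_spec : ∀ (fuel j : ℕ) (num : Int), 1 ≤ num → num ≤ (Nat.fib (j+1+fuel) : ℤ) →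
    ∃ k, j+1 ≤ k ∧ lastFibAux fuel num (Nat.fib j) (Nat.fib (j+1)) = (Nat.fib k : ℤ) ∧
      num ≤ (Nat.fib k : ℤ) ∧ ∀ i, j+1 ≤ i → i < k → (Nat.fib i : ℤ) < num := by
  intro fuel
  induction fuel with
  | zero =>
    intro j num h1 h2
    exact ⟨j+1, le_rfl, rfl, by simpa using h2, fun i hi1 hi2 => absurd (Nat.lt_of_le_of_lt hi1 hi2) (by omega)⟩
  | succ fuel ih =>
    intro j num h1 h2
    simp only [lastFibAux]
    by_cases hb : (Nat.fib (j+1) : ℤ) < num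
    · rw [if_pos hb]
      have hfib : (Nat.fib j : ℤ) + Nat.fib (j+1) = (Nat.fib (j+1+1) : ℤ) := by
        rw [show j+1+1 = j+2 from rfl, Nat.fib_add_two]; push_cast; ring
      rw [hfib]
      obtain ⟨k, hk1, hk2, hk3, hk4⟩ := ih (j+1) num h1
        (by rw [show j+1+1+fuel = j+1+(fuel+1) by omega]; exact h2)
      refine ⟨k, by omega, hk2, hk3, fun i hi1 hi2 => ?_⟩
      rcases Nat.eq_or_lt_of_le hi1 with rfl | hgt
      · exact hb
      · exact hk4 i hgt hi2
    · rw [if_neg hb]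
      exact ⟨j+1, le_rfl, rfl, by omega, fun i hi1 hi2 => absurd (Nat.lt_of_le_of_lt hi1 hi2) (by omega)⟩

lemma lastfib_iff (n : Int) : n = last_fib n ↔ (0 ≤ n ∧ ∃ k, n = (Nat.fib k : ℤ)) := by
  by_cases h0 : n = 0
  · subst h0
    simp [last_fib]
    exact ⟨0, by simp⟩
  by_cases hneg : n < 0
  · have ht : n.toNat = 0 := Int.toNat_of_nonpos (by omega)
    rw [last_fib, if_neg h0, ht]
    simp only [lastFibAux, if_neg (show ¬ (1 : ℤ) < n by omega)]
    constructor
    · intro h; omega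
    · rintro ⟨h, -⟩; omega
  -- n ≥ 1
  have hpos : 1 ≤ n := by omega
  have hfuel : n ≤ (Nat.fib (0 + 1 + (n.toNat + 2)) : ℤ) := by
    have := fibGrow n.toNat
    have hc : (n.toNat : ℤ) = n := Int.toNat_of_nonneg (by omega)
    rw [show 0 + 1 + (n.toNat + 2) = n.toNat + 3 by omega]
    omega
  obtain ⟨k, hk1, hk2, hk3, hk4⟩ := lastFibAux_spec (n.toNat + 2) 0 n hpos hfuel
  have hlf : last_fib n = (Nat.fib k : ℤ) := by
    rw [last_fib, if_neg h0]
    rw [show (0:ℤ) = ((Nat.fib 0 : ℕ) : ℤ) by simp, show (1:ℤ) = ((Nat.fib 1 : ℕ) : ℤ) by simp]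
    exact hk2
  rw [hlf]
  constructor
  · intro h; exact ⟨by omega, k, h⟩
  · rintro ⟨-, K, hK⟩
    have hK1 : 1 ≤ K := by
      by_contra h
      have : K = 0 := by omega
      rw [this] at hK; simp at hK; omega
    by_cases hKk : K < k
    · have := hk4 K hK1 hKk
      omega
    · have : Nat.fib k ≤ Nat.fib K := Nat.fib_mono (by omega)
      have : (Nat.fib k : ℤ) ≤ (Nat.fib K : ℤ) := by exact_mod_cast this
      omega

-- loop equivalence
lemma tripleAll_short (l : List Int) (h : l.length < 3) : tripleAll l = true := by
  rcases l with _ | ⟨a, _ | ⟨b, _ | ⟨c, t⟩⟩⟩ <;> first | rfl | (exfalso; simp at h; omega)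

lemma tripleAll_cons (a b c : Int) (l : List Int) :
    tripleAll (a::b::c::l) = ((a + b == c) && tripleAll (b::c::l)) := by
  simp [tripleAll]

lemma checkLoop_eq (data : List Int) : ∀ i, checkLoop data i = tripleAll (data.drop i) := by
  suffices H : ∀ d i, data.length ≤ i + d → checkLoop data i = tripleAll (data.drop i) by
    exact fun i => H data.length i (by omega)
  intro d
  induction d with
  | zero =>
    intro i h
    rw [checkLoop, dif_neg (by omega)]
    exact (tripleAll_short _ (by simp; omega)).symm
  | succ d ihd =>
    intro i h
    rw [checkLoop]
    by_cases hc : i + 3 ≤ data.length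
    · rw [dif_pos hc]
      have h0 : i < data.length := by omega
      have h1 : i + 1 < data.length := by omega
      have h2 : i + 2 < data.length := by omega
      have hd0 : data.drop i = data.getD i 0 :: data.getD (i+1) 0 :: data.getD (i+2) 0 :: data.drop (i+3) := by
        rw [List.getD_eq_getElem data 0 h0, List.getD_eq_getElem data 0 h1, List.getD_eq_getElem data 0 h2]
        rw [List.drop_eq_getElem_cons h0, List.drop_eq_getElem_cons h1, List.drop_eq_getElem_cons h2]
      have hd1 : data.drop (i+1) = data.getD (i+1) 0 :: data.getD (i+2) 0 :: data.drop (i+3) := by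
        rw [List.getD_eq_getElem data 0 h1, List.getD_eq_getElem data 0 h2]
        rw [List.drop_eq_getElem_cons h1, List.drop_eq_getElem_cons h2]
      rw [hd0, tripleAll_cons, ← hd1]
      by_cases heq : data.getD i 0 + data.getD (i+1) 0 = data.getD (i+2) 0
      · rw [if_pos heq, ihd (i+1) (by omega)]
        rw [show (data.getD i 0 + data.getD (i+1) 0 == data.getD (i+2) 0) = true from beq_iff_eq.mpr heq, Bool.true_and]
      · rw [if_neg heq]
        rw [show (data.getD i 0 + data.getD (i+1) 0 == data.getD (i+2) 0) = false from beq_eq_false_iff_ne.mpr heq, Bool.false_and]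
    · rw [dif_neg hc]
      exact (tripleAll_short _ (by simp; omega)).symm

-- ===== VERDICT (by name: the statement is the Claim_ definition above) =====
theorem check_fibonacci_spec : Claim_equal_check_fibonacci := by
  intro data _dom
  show check_fibonacci data = check_fibonacci_alt data
  rw [check_fibonacci, check_fibonacci_alt]
  by_cases h3 : data.length < 3
  · simp [h3]
  have hloop : checkLoop data 0 = tripleAll data := by simpa using checkLoop_eq data 0
  set d0 := data.getD 0 0 with hd0
  set d1 := data.getD 1 0 with hd1
  by_cases hfib : 0 ≤ d0 ∧ ∃ k, d0 = (Nat.fib k : ℤ)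
  · have h1 : d0 = last_fib d0 := (lastfib_iff d0).mpr hfib
    have h2 : is_fib d0 = true := (isfib_iff d0).mpr hfib
    have h0 : ¬ d0 < 0 := by omega
    by_cases hd1' : d1 < 0 <;> simp [h3, ← h1, h2, h0, hd1', hloop]
  · have h1 : d0 ≠ last_fib d0 := fun e => hfib ((lastfib_iff d0).mp e)
    have h2 : is_fib d0 = false := by
      rw [← Bool.not_eq_true]
      exact fun e => hfib ((isfib_iff d0).mp e)
    simp [h3, h1, h2]
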